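-- pv_equiv track=rewrite | github.com/dyj86137/hanlp_triple_extraction | triple_extraction.py | extract_complete_phrase
-- ===== SOURCE A (Python) =====
-- def extract_complete_phrase(start_idx, tokens, dependencies, pos_tags):
--     """收集所有修饰给定词的形容词、限定词和复合词"""
--     if start_idx < 0 or start_idx >= len(tokens):
--         return ""
--
--     phrase_components = [(start_idx, tokens[start_idx])]  # 包含目标词本身
--     visited = set([start_idx])
--
--     # 1. 递归收集所有依赖于当前节点的修饰词
--     def collect_modifiers(node_idx, depth=0, max_depth=3):
--         if depth > max_depth or node_idx in visited:
--             return []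
--
--         modifiers = []
--         for i, (head, relation) in enumerate(dependencies):
--             if i >= len(tokens):
--                 continue
--
--             if head - 1 == node_idx and i not in visited:
--                 # 包含更多修饰关系
--                 if relation in ['amod', 'advmod', 'det', 'compound:nn', 'nmod:assmod', 'dep', 'mark']:
--                     modifiers.append((i, tokens[i]))
--                     visited.add(i)
--                     # 递归收集修饰词的修饰词
--                     modifiers.extend(collect_modifiers(i, depth+1))
--
--                 # 特别处理"的"字结构
--                 elif relation == 'case' and tokens[i] == '的':
--                     modifiers.append((i, tokens[i]))
--                     visited.add(i)
--
--         return modifiers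
--
--     # 收集目标词的所有修饰词
--     phrase_components.extend(collect_modifiers(start_idx))
--
--     # 2. 反向处理: 如果当前词是修饰词，也获取它修饰的词
--     for i, (head, relation) in enumerate(dependencies):
--         if i == start_idx and relation in ['amod', 'advmod', 'compound:nn', 'mark']:
--             target_idx = head - 1
--             if target_idx >= 0 and target_idx < len(tokens) and target_idx not in visited:
--                 phrase_components.append((target_idx, tokens[target_idx]))
--                 visited.add(target_idx)
--                 # 继续收集这个被修饰词的其他修饰词
--                 phrase_components.extend(collect_modifiers(target_idx))
--
--     # 3. 特殊处理连续的形容词-"的"-名词结构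
--     for i, token in enumerate(tokens):
--         if token == "的" and i > 0 and i < len(tokens) - 1:
--             # 检查"的"前面是否是形容词，后面是否是名词
--             if i-1 in visited or i+1 in visited:  # 如果"的"的前后词有一个在已收集集合中
--                 if i-1 not in visited:
--                     phrase_components.append((i-1, tokens[i-1]))
--                     visited.add(i-1)
--                 if i not in visited:
--                     phrase_components.append((i, tokens[i]))
--                     visited.add(i)
--                 if i+1 not in visited:
--                     phrase_components.append((i+1, tokens[i+1]))
--                     visited.add(i+1)
--
--     # 4. 特殊处理形容词前的副词(如"最常用的")
--     for idx, token in phrase_components: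
--         if idx > 0:
--             prev_idx = idx - 1
--             if prev_idx not in visited and prev_idx < len(tokens):
--                 prev_pos = pos_tags[prev_idx]
--                 if prev_pos == 'AD':  # 副词
--                     phrase_components.append((prev_idx, tokens[prev_idx]))
--                     visited.add(prev_idx)
--
--     # 按原文顺序排列并去重
--     unique_components = []
--     for idx, token in phrase_components:
--         if 0 <= idx < len(tokens):  # 确保索引有效
--             unique_components.append((idx, token))
--
--     # 排序并构建短语
--     unique_components.sort()
--     phrase = ''.join([token for _, token in unique_components])
--     return phrase
-- ===== SOURCE B (Python) =====
-- def extract_complete_phrase(start_idx, tokens, dependencies, pos_tags):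
--     """收集所有修饰给定词的形容词、限定词和复合词
--
--     Simpler rewrite: the original's recursive collect_modifiers is dead code
--     (it is always invoked on a node already in visited and returns [] at
--     once), so it is omitted; the phrase is kept as one ordered list of
--     indices instead of (index, token) pairs guarded by a parallel set."""
--     n = len(tokens)
--     if start_idx < 0 or start_idx >= n:
--         return ""
--     seen = [start_idx]
--     # reverse pass: the word this token modifies
--     for i, (head, relation) in enumerate(dependencies):
--         if i == start_idx and relation in ('amod', 'advmod', 'compound:nn', 'mark'):
--             t = head - 1
--             if 0 <= t < n and t not in seen:
--                 seen.append(t)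
--     # adjective-"的"-noun pass
--     for i, token in enumerate(tokens):
--         if token == '的' and 0 < i < n - 1 and (i - 1 in seen or i + 1 in seen):
--             for j in (i - 1, i, i + 1):
--                 if j not in seen:
--                     seen.append(j)
--     # adverb ('AD') chain to the left of anything collected, worklist style
--     qi = 0
--     while qi < len(seen):
--         p = seen[qi] - 1
--         if p >= 0 and p not in seen and pos_tags[p] == 'AD':
--             seen.append(p)
--         qi += 1
--     return ''.join(tokens[i] for i in sorted(seen))
-- ===== Notes on version B (the rewrite author's own statement) =====
-- stated objective: simpler
-- what changed: B drops the original's entire recursive collect_modifiers machinery after observing it is dead code (always called on an already-visited node, so it returns [] immediately), and keeps a single ordered list of indices instead of a list of (index,token) pairs mirrored by a visited set, finishing with a sort of indices rather than of pairs.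
-- outside the precondition, e.g. on extract_complete_phrase(1, ['a', 'b'], [], []): A raises IndexError, B raises IndexError; on extract_complete_phrase(0, ['a', 'b', 'c'], [], []): A returns 'a', B returns 'a'
import Mathlib
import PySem

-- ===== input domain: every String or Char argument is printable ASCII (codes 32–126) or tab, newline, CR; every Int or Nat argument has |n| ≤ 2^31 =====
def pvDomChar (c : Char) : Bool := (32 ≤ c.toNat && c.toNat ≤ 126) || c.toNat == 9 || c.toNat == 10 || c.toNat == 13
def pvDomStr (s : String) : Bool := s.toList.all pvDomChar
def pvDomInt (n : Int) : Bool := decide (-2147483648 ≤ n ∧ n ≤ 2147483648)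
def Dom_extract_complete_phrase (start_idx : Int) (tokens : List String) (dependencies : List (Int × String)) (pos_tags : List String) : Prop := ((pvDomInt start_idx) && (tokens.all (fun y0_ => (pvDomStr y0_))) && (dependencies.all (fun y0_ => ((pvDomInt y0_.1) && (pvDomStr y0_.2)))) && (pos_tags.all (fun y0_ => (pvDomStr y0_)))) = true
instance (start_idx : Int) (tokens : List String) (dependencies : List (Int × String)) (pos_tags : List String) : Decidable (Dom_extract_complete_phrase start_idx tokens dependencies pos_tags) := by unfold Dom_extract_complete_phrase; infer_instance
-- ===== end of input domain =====

-- B is a simpler rewrite: A's recursive collect_modifiers is dead code (always called on an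
-- already-visited node, returning [] at once), so B omits it and keeps one ordered list of
-- indices instead of a pair list mirrored by a visited set. Objective: simpler; not faster.

-- ===== PORT A =====
def pvA_rels1 : List String := ["amod", "advmod", "det", "compound:nn", "nmod:assmod", "dep", "mark"]
def pvA_rels2 : List String := ["amod", "advmod", "compound:nn", "mark"]

-- collect_modifiers: fuel = max_depth + 1 - depth (top-level call: fuel = 4); fuel = 0 ↔ depth > max_depth
def pvA_collect (tokens : List String) (deps : List (Int × String)) :
    Nat → Int → PySem.Set Int → List (Int × String) × PySem.Set Int
  | 0, _, visited => ([], visited)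
  | fuel + 1, node_idx, visited =>
    if PySem.Set.contains visited node_idx then ([], visited)
    else
      (PySem.List.enumerate deps).foldl
        (fun acc p =>
          if p.1 ≥ (tokens.length : Int) then acc
          else if p.2.1 - 1 == node_idx && !(PySem.Set.contains acc.2 p.1) then
            if pvA_rels1.contains p.2.2 then
              let mods := acc.1 ++ [(p.1, PySem.List.pyGetD tokens p.1 "")]
              let vis := PySem.Set.add acc.2 p.1
              let r := pvA_collect tokens deps fuel p.1 vis
              (mods ++ r.1, r.2)
            else if p.2.2 == "case" && PySem.List.pyGetD tokens p.1 "" == "的" then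
              (acc.1 ++ [(p.1, PySem.List.pyGetD tokens p.1 "")], PySem.Set.add acc.2 p.1)
            else acc
          else acc)
        ([], visited)

-- pass 4: 'for idx, token in phrase_components' iterating the list while it grows;
-- fuel (initial length + len(tokens)) only makes the recursion total, it is never exhausted
def pvA_pass4 (tokens pos_tags : List String) :
    Nat → List (Int × String) → PySem.Set Int → List (Int × String) × PySem.Set Int
  | 0, pending, visited => (pending, visited)
  | _ + 1, [], visited => ([], visited)
  | fuel + 1, p :: rest, visited =>
    if p.1 > 0 then
      let prev := p.1 - 1
      if !(PySem.Set.contains visited prev) && prev < (tokens.length : Int) then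
        if PySem.List.pyGetD pos_tags prev "" == "AD" then
          let r := pvA_pass4 tokens pos_tags fuel (rest ++ [(prev, PySem.List.pyGetD tokens prev "")]) (PySem.Set.add visited prev)
          (p :: r.1, r.2)
        else
          let r := pvA_pass4 tokens pos_tags fuel rest visited
          (p :: r.1, r.2)
      else
        let r := pvA_pass4 tokens pos_tags fuel rest visited
        (p :: r.1, r.2)
    else
      let r := pvA_pass4 tokens pos_tags fuel rest visited
      (p :: r.1, r.2)

def extract_complete_phrase (start_idx : Int) (tokens : List String) (dependencies : List (Int × String)) (pos_tags : List String) : String :=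
  if start_idx < 0 || start_idx ≥ (tokens.length : Int) then ""
  else
    let comps0 : List (Int × String) := [(start_idx, PySem.List.pyGetD tokens start_idx "")]
    let visited0 : PySem.Set Int := PySem.Set.ofList [start_idx]
    let r1 := pvA_collect tokens dependencies 4 start_idx visited0
    -- pass 2: reverse direction
    let s2 := (PySem.List.enumerate dependencies).foldl
      (fun (acc : List (Int × String) × PySem.Set Int) p =>
        if p.1 == start_idx && pvA_rels2.contains p.2.2 then
          let t := p.2.1 - 1
          if 0 ≤ t && t < (tokens.length : Int) && !(PySem.Set.contains acc.2 t) then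
            let comps := acc.1 ++ [(t, PySem.List.pyGetD tokens t "")]
            let vis := PySem.Set.add acc.2 t
            let r := pvA_collect tokens dependencies 4 t vis
            (comps ++ r.1, r.2)
          else acc
        else acc)
      (comps0 ++ r1.1, r1.2)
    -- pass 3: adjective-"的"-noun
    let s3 := (PySem.List.enumerate tokens).foldl
      (fun (acc : List (Int × String) × PySem.Set Int) p =>
        if p.2 == "的" && p.1 > 0 && p.1 < (tokens.length : Int) - 1 then
          if PySem.Set.contains acc.2 (p.1 - 1) || PySem.Set.contains acc.2 (p.1 + 1) then
            let a1 := if !(PySem.Set.contains acc.2 (p.1 - 1)) then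
                (acc.1 ++ [(p.1 - 1, PySem.List.pyGetD tokens (p.1 - 1) "")], PySem.Set.add acc.2 (p.1 - 1))
              else acc
            let a2 := if !(PySem.Set.contains a1.2 p.1) then
                (a1.1 ++ [(p.1, PySem.List.pyGetD tokens p.1 "")], PySem.Set.add a1.2 p.1)
              else a1
            if !(PySem.Set.contains a2.2 (p.1 + 1)) then
              (a2.1 ++ [(p.1 + 1, PySem.List.pyGetD tokens (p.1 + 1) "")], PySem.Set.add a2.2 (p.1 + 1))
            else a2
          else acc
        else acc)
      s2
    -- pass 4: adverbs left of collected words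
    let s4 := pvA_pass4 tokens pos_tags (s3.1.length + tokens.length) s3.1 s3.2
    -- filter to valid indices, sort (tuples), join
    let uniqs := s4.1.foldl (fun acc p => if 0 ≤ p.1 && p.1 < (tokens.length : Int) then acc ++ [p] else acc) []
    PySem.Str.join "" ((PySem.List.sorted2 uniqs Prod.fst Prod.snd).map Prod.snd)

-- ===== PORT B =====
def pvB_rels : List String := ["amod", "advmod", "compound:nn", "mark"]

-- the worklist loop 'while qi < len(seen)'; pending = seen[qi:]; fuel never exhausted
def pvB_pass4 (pos_tags : List String) : Nat → List Int → List Int → List Int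
  | 0, _, seen => seen
  | _ + 1, [], seen => seen
  | fuel + 1, q :: rest, seen =>
    let p := q - 1
    if 0 ≤ p && !(seen.contains p) && PySem.List.pyGetD pos_tags p "" == "AD" then
      pvB_pass4 pos_tags fuel (rest ++ [p]) (seen ++ [p])
    else
      pvB_pass4 pos_tags fuel rest seen

def extract_complete_phrase_alt (start_idx : Int) (tokens : List String) (dependencies : List (Int × String)) (pos_tags : List String) : String :=
  if start_idx < 0 || start_idx ≥ (tokens.length : Int) then ""
  else
    let seen1 := (PySem.List.enumerate dependencies).foldl
      (fun (seen : List Int) p =>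
        if p.1 == start_idx && pvB_rels.contains p.2.2 then
          let t := p.2.1 - 1
          if 0 ≤ t && t < (tokens.length : Int) && !(seen.contains t) then seen ++ [t] else seen
        else seen)
      [start_idx]
    let seen2 := (PySem.List.enumerate tokens).foldl
      (fun (seen : List Int) p =>
        if p.2 == "的" && 0 < p.1 && p.1 < (tokens.length : Int) - 1
            && (seen.contains (p.1 - 1) || seen.contains (p.1 + 1)) then
          [p.1 - 1, p.1, p.1 + 1].foldl (fun s j => if !(s.contains j) then s ++ [j] else s) seen
        else seen)
      seen1
    let seen3 := pvB_pass4 pos_tags (seen2.length + tokens.length) seen2 seen2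
    PySem.Str.join "" ((PySem.List.sorted seen3 (fun x => x)).map (fun i => PySem.List.pyGetD tokens i ""))

-- ===== PRECONDITION & SPEC =====
-- Pre_ excludes inputs with pos_tags shorter than tokens[:-1]: there pass 4 can index
-- pos_tags out of range and A raises IndexError (B raises identically); on some such inputs
-- A happens to return because no collected index exceeds 0 — see claim.json "cites".
def Pre_extract_complete_phrase (start_idx : Int) (tokens : List String) (dependencies : List (Int × String)) (pos_tags : List String) : Prop :=
  start_idx < 0 ∨ start_idx ≥ (tokens.length : Int) ∨ tokens.length ≤ pos_tags.length + 1
instance (start_idx : Int) (tokens : List String) (dependencies : List (Int × String)) (pos_tags : List String) : Decidable (Pre_extract_complete_phrase start_idx tokens dependencies pos_tags) := by unfold Pre_extract_complete_phrase; infer_instance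

def pvWitness_extract_complete_phrase : Int × List String × (List (Int × String)) × List String :=
  (1, ["quick", "fox"], [(2, "amod")], ["AD", "NN"])

def Spec_extract_complete_phrase (start_idx : Int) (tokens : List String) (dependencies : List (Int × String)) (pos_tags : List String) (out : String) : Prop := out = extract_complete_phrase_alt start_idx tokens dependencies pos_tags
instance (start_idx : Int) (tokens : List String) (dependencies : List (Int × String)) (pos_tags : List String) (out : String) : Decidable (Spec_extract_complete_phrase start_idx tokens dependencies pos_tags out) := by unfold Spec_extract_complete_phrase; infer_instance

-- ===== CLAIM (what is proved, stated in full; the proofs are below) =====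
def Claim_equal_extract_complete_phrase : Prop := ∀ (start_idx : Int) (tokens : List String) (dependencies : List (Int × String)) (pos_tags : List String), Dom_extract_complete_phrase start_idx tokens dependencies pos_tags → Pre_extract_complete_phrase start_idx tokens dependencies pos_tags → Spec_extract_complete_phrase start_idx tokens dependencies pos_tags (extract_complete_phrase start_idx tokens dependencies pos_tags)

-- ===== LEMMAS AND PROOFS =====

-- helper used only by the proofs: the pair A keeps for index i
def pvg (tokens : List String) (i : Int) : Int × String := (i, PySem.List.pyGetD tokens i "")

-- invariant carried through the passes: indices in range, never repeated
def pvInv (tokens : List String) (seen : List Int) : Prop :=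
  (∀ x ∈ seen, 0 ≤ x ∧ x < (tokens.length : Int)) ∧ seen.Nodup

-- let-free restatements (definitionally equal) of the loop bodies of the two ports
def pvStepA2 (tokens : List String) (deps0 : List (Int × String)) (si : Int)
    (acc : List (Int × String) × PySem.Set Int) (p : Int × (Int × String)) :
    List (Int × String) × PySem.Set Int :=
  if p.1 == si && pvA_rels2.contains p.2.2 then
    if 0 ≤ p.2.1 - 1 && p.2.1 - 1 < (tokens.length : Int) && !(PySem.Set.contains acc.2 (p.2.1 - 1)) then
      (acc.1 ++ [(p.2.1 - 1, PySem.List.pyGetD tokens (p.2.1 - 1) "")]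
         ++ (pvA_collect tokens deps0 4 (p.2.1 - 1) (PySem.Set.add acc.2 (p.2.1 - 1))).1,
       (pvA_collect tokens deps0 4 (p.2.1 - 1) (PySem.Set.add acc.2 (p.2.1 - 1))).2)
    else acc
  else acc

def pvStepB2 (tokens : List String) (si : Int) (seen : List Int) (p : Int × (Int × String)) : List Int :=
  if p.1 == si && pvB_rels.contains p.2.2 then
    if 0 ≤ p.2.1 - 1 && p.2.1 - 1 < (tokens.length : Int) && !(seen.contains (p.2.1 - 1)) then
      seen ++ [p.2.1 - 1]
    else seen
  else seen

def pvStepA3 (tokens : List String) (acc : List (Int × String) × PySem.Set Int) (p : Int × String) :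
    List (Int × String) × PySem.Set Int :=
  if p.2 == "的" && p.1 > 0 && p.1 < (tokens.length : Int) - 1 then
    if PySem.Set.contains acc.2 (p.1 - 1) || PySem.Set.contains acc.2 (p.1 + 1) then
      let a1 := if !(PySem.Set.contains acc.2 (p.1 - 1)) then
          (acc.1 ++ [(p.1 - 1, PySem.List.pyGetD tokens (p.1 - 1) "")], PySem.Set.add acc.2 (p.1 - 1))
        else acc
      let a2 := if !(PySem.Set.contains a1.2 p.1) then
          (a1.1 ++ [(p.1, PySem.List.pyGetD tokens p.1 "")], PySem.Set.add a1.2 p.1)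
        else a1
      if !(PySem.Set.contains a2.2 (p.1 + 1)) then
        (a2.1 ++ [(p.1 + 1, PySem.List.pyGetD tokens (p.1 + 1) "")], PySem.Set.add a2.2 (p.1 + 1))
      else a2
    else acc
  else acc

def pvStepB3 (tokens : List String) (seen : List Int) (p : Int × String) : List Int :=
  if p.2 == "的" && 0 < p.1 && p.1 < (tokens.length : Int) - 1
      && (seen.contains (p.1 - 1) || seen.contains (p.1 + 1)) then
    [p.1 - 1, p.1, p.1 + 1].foldl (fun s j => if !(s.contains j) then s ++ [j] else s) seen
  else seen

def pvCleanA (start_idx : Int) (tokens : List String) (deps : List (Int × String)) (pos_tags : List String) : String :=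
  if start_idx < 0 || start_idx ≥ (tokens.length : Int) then ""
  else
    PySem.Str.join ""
      ((PySem.List.sorted2
          ((pvA_pass4 tokens pos_tags
              (((PySem.List.enumerate tokens).foldl (pvStepA3 tokens)
                  ((PySem.List.enumerate deps).foldl (pvStepA2 tokens deps start_idx)
                    ([(start_idx, PySem.List.pyGetD tokens start_idx "")]
                        ++ (pvA_collect tokens deps 4 start_idx (PySem.Set.ofList [start_idx])).1,
                      (pvA_collect tokens deps 4 start_idx (PySem.Set.ofList [start_idx])).2))).1.length
                + tokens.length)
              ((PySem.List.enumerate tokens).foldl (pvStepA3 tokens)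
                  ((PySem.List.enumerate deps).foldl (pvStepA2 tokens deps start_idx)
                    ([(start_idx, PySem.List.pyGetD tokens start_idx "")]
                        ++ (pvA_collect tokens deps 4 start_idx (PySem.Set.ofList [start_idx])).1,
                      (pvA_collect tokens deps 4 start_idx (PySem.Set.ofList [start_idx])).2))).1
              ((PySem.List.enumerate tokens).foldl (pvStepA3 tokens)
                  ((PySem.List.enumerate deps).foldl (pvStepA2 tokens deps start_idx)
                    ([(start_idx, PySem.List.pyGetD tokens start_idx "")]
                        ++ (pvA_collect tokens deps 4 start_idx (PySem.Set.ofList [start_idx])).1,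
                      (pvA_collect tokens deps 4 start_idx (PySem.Set.ofList [start_idx])).2))).2).1.foldl
            (fun acc q => if 0 ≤ q.1 && q.1 < (tokens.length : Int) then acc ++ [q] else acc) [])
          Prod.fst Prod.snd).map Prod.snd)

def pvCleanB (start_idx : Int) (tokens : List String) (deps : List (Int × String)) (pos_tags : List String) : String :=
  if start_idx < 0 || start_idx ≥ (tokens.length : Int) then ""
  else
    PySem.Str.join ""
      ((PySem.List.sorted
          (pvB_pass4 pos_tags
            (((PySem.List.enumerate tokens).foldl (pvStepB3 tokens)
                ((PySem.List.enumerate deps).foldl (pvStepB2 tokens start_idx) [start_idx])).length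
              + tokens.length)
            ((PySem.List.enumerate tokens).foldl (pvStepB3 tokens)
              ((PySem.List.enumerate deps).foldl (pvStepB2 tokens start_idx) [start_idx]))
            ((PySem.List.enumerate tokens).foldl (pvStepB3 tokens)
              ((PySem.List.enumerate deps).foldl (pvStepB2 tokens start_idx) [start_idx])))
          (fun x => x)).map (fun i => PySem.List.pyGetD tokens i ""))

-- A's recursive collect_modifiers is dead: called on a visited node it returns [] at once
theorem pvA_collect_dead (tokens : List String) (deps : List (Int × String)) (fuel : Nat)
    (node : Int) (v : PySem.Set Int) (h : node ∈ v) :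
    pvA_collect tokens deps fuel node v = ([], v) := by
  cases fuel <;> simp [pvA_collect, h]

theorem pv_add_of_not_mem (v : PySem.Set Int) (x : Int) (h : x ∉ v) :
    PySem.Set.add v x = v ++ [x] := by
  simp [PySem.Set.add, h]

theorem pv_nodup_snoc (s : List Int) (x : Int) (hnd : s.Nodup) (hm : x ∉ s) : (s ++ [x]).Nodup := by
  rw [List.nodup_append]
  refine ⟨hnd, List.nodup_singleton _, ?_⟩
  intro a ha b hbm
  rw [List.mem_singleton] at hbm
  subst hbm
  exact fun he => hm (he ▸ ha)

theorem pv_step2_eq (tokens : List String) (deps0 : List (Int × String)) (si : Int)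
    (seen : List Int) (p : Int × (Int × String)) (hinv : pvInv tokens seen) :
    pvStepA2 tokens deps0 si (seen.map (pvg tokens), seen) p
        = ((pvStepB2 tokens si seen p).map (pvg tokens), pvStepB2 tokens si seen p)
      ∧ pvInv tokens (pvStepB2 tokens si seen p) := by
  obtain ⟨hb, hnd⟩ := hinv
  unfold pvStepA2 pvStepB2
  by_cases h1 : (p.1 == si && pvA_rels2.contains p.2.2) = true
  · have h1' : (p.1 == si && pvB_rels.contains p.2.2) = true := h1
    rw [if_pos h1, if_pos h1']
    by_cases hc : (0 ≤ p.2.1 - 1 && p.2.1 - 1 < (tokens.length : Int) && !(PySem.Set.contains seen (p.2.1 - 1))) = true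
    · have hc' : (0 ≤ p.2.1 - 1 && p.2.1 - 1 < (tokens.length : Int) && !(seen.contains (p.2.1 - 1))) = true := hc
      rw [if_pos hc, if_pos hc']
      have hx : (0 ≤ p.2.1 - 1 ∧ p.2.1 - 1 < (tokens.length : Int)) ∧ p.2.1 - 1 ∉ seen := by
        simpa [PySem.Set.contains] using hc
      rw [pv_add_of_not_mem _ _ hx.2, pvA_collect_dead _ _ _ _ _ (by simp)]
      refine ⟨by simp [pvg], ?_, ?_⟩
      · intro x hxm
        rcases List.mem_append.1 hxm with hxm | hxm
        · exact hb x hxm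
        · simp only [List.mem_singleton] at hxm; subst hxm; exact hx.1
      · exact pv_nodup_snoc _ _ hnd hx.2
    · have hc' : ¬ (0 ≤ p.2.1 - 1 && p.2.1 - 1 < (tokens.length : Int) && !(seen.contains (p.2.1 - 1))) = true := hc
      rw [if_neg hc, if_neg hc']
      exact ⟨rfl, hb, hnd⟩
  · have h1' : ¬ (p.1 == si && pvB_rels.contains p.2.2) = true := h1
    rw [if_neg h1, if_neg h1']
    exact ⟨rfl, hb, hnd⟩

theorem pv_pass2 (tokens : List String) (deps0 : List (Int × String)) (si : Int)
    (l : List (Int × (Int × String))) :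
    ∀ (seen : List Int), pvInv tokens seen →
      l.foldl (pvStepA2 tokens deps0 si) (seen.map (pvg tokens), seen)
          = ((l.foldl (pvStepB2 tokens si) seen).map (pvg tokens), l.foldl (pvStepB2 tokens si) seen)
        ∧ pvInv tokens (l.foldl (pvStepB2 tokens si) seen) := by
  induction l with
  | nil => exact fun seen h => ⟨rfl, h⟩
  | cons p l ih =>
    intro seen h
    obtain ⟨he, hi⟩ := pv_step2_eq tokens deps0 si seen p h
    rw [List.foldl_cons, List.foldl_cons, he]
    exact ih _ hi

-- the three sequential conditional appends of pass 3, in lockstep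
theorem pv_chain3 (tokens : List String) (js : List Int) :
    ∀ (s : List Int), pvInv tokens s → (∀ j ∈ js, 0 ≤ j ∧ j < (tokens.length : Int)) →
      js.foldl (fun (a : List (Int × String) × PySem.Set Int) j =>
          if !(PySem.Set.contains a.2 j) then
            (a.1 ++ [(j, PySem.List.pyGetD tokens j "")], PySem.Set.add a.2 j)
          else a) (s.map (pvg tokens), s)
        = ((js.foldl (fun s j => if !(s.contains j) then s ++ [j] else s) s).map (pvg tokens),
           js.foldl (fun s j => if !(s.contains j) then s ++ [j] else s) s)
      ∧ pvInv tokens (js.foldl (fun s j => if !(s.contains j) then s ++ [j] else s) s) := by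
  induction js with
  | nil => exact fun s hs _ => ⟨rfl, hs⟩
  | cons j js ihj =>
    intro s hs hjb
    rw [List.foldl_cons, List.foldl_cons]
    by_cases hj : (!(PySem.Set.contains s j)) = true
    · have hj' : (!(List.contains s j)) = true := hj
      have hjm : j ∉ s := by simpa [PySem.Set.contains] using hj
      rw [if_pos hj, if_pos hj', pv_add_of_not_mem _ _ hjm]
      have hmap : (s.map (pvg tokens)) ++ [(j, PySem.List.pyGetD tokens j "")]
          = (s ++ [j]).map (pvg tokens) := by simp [pvg]
      rw [hmap]
      refine ihj (s ++ [j]) ?_ (fun x hx => hjb x (List.mem_cons_of_mem _ hx))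
      obtain ⟨hsb, hsnd⟩ := hs
      refine ⟨?_, ?_⟩
      · intro x hx
        rcases List.mem_append.1 hx with hx | hx
        · exact hsb x hx
        · rw [List.mem_singleton] at hx; rw [hx]
          exact hjb j (by simp)
      · exact pv_nodup_snoc _ _ hsnd hjm
    · have hj' : ¬ (!(List.contains s j)) = true := hj
      rw [if_neg hj, if_neg hj']
      exact ihj s hs (fun x hx => hjb x (List.mem_cons_of_mem _ hx))

theorem pv_step3_eq (tokens : List String) (seen : List Int) (p : Int × String)
    (hinv : pvInv tokens seen) :
    pvStepA3 tokens (seen.map (pvg tokens), seen) p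
        = ((pvStepB3 tokens seen p).map (pvg tokens), pvStepB3 tokens seen p)
      ∧ pvInv tokens (pvStepB3 tokens seen p) := by
  unfold pvStepA3 pvStepB3
  by_cases h1 : (p.2 == "的" && p.1 > 0 && p.1 < (tokens.length : Int) - 1) = true
  · by_cases hcd : (PySem.Set.contains seen (p.1 - 1) || PySem.Set.contains seen (p.1 + 1)) = true
    · have hcd' : (seen.contains (p.1 - 1) || seen.contains (p.1 + 1)) = true := hcd
      have h1' : (p.2 == "的" && 0 < p.1 && p.1 < (tokens.length : Int) - 1
          && (seen.contains (p.1 - 1) || seen.contains (p.1 + 1))) = true := by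
        rw [show (p.2 == "的" && 0 < p.1 && p.1 < (tokens.length : Int) - 1) = true from h1, hcd']
        rfl
      rw [if_pos h1, if_pos hcd, if_pos h1']
      have hbd := h1
      simp only [Bool.and_eq_true, decide_eq_true_eq] at hbd
      have hchain := pv_chain3 tokens [p.1 - 1, p.1, p.1 + 1] seen hinv
        (by
          intro j hj
          simp only [List.mem_cons, List.not_mem_nil, or_false] at hj
          rcases hj with h | h | h <;> subst h <;> exact ⟨by omega, by omega⟩)
      simp only [List.foldl_cons, List.foldl_nil] at hchain
      exact ⟨hchain.1, hchain.2⟩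
    · have h1' : ¬ (p.2 == "的" && 0 < p.1 && p.1 < (tokens.length : Int) - 1
          && (seen.contains (p.1 - 1) || seen.contains (p.1 + 1))) = true := by
        intro h
        simp only [Bool.and_eq_true] at h
        exact hcd h.2
      rw [if_pos h1, if_neg hcd, if_neg h1']
      exact ⟨rfl, hinv⟩
  · have h1' : ¬ (p.2 == "的" && 0 < p.1 && p.1 < (tokens.length : Int) - 1
        && (seen.contains (p.1 - 1) || seen.contains (p.1 + 1))) = true := by
      intro h
      simp only [Bool.and_eq_true] at h
      exact h1 (by rw [h.1.1.1, h.1.1.2, h.1.2]; rfl)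
    rw [if_neg h1, if_neg h1']
    exact ⟨rfl, hinv⟩

theorem pv_pass3 (tokens : List String) (l : List (Int × String)) :
    ∀ (seen : List Int), pvInv tokens seen →
      l.foldl (pvStepA3 tokens) (seen.map (pvg tokens), seen)
          = ((l.foldl (pvStepB3 tokens) seen).map (pvg tokens), l.foldl (pvStepB3 tokens) seen)
        ∧ pvInv tokens (l.foldl (pvStepB3 tokens) seen) := by
  induction l with
  | nil => exact fun seen h => ⟨rfl, h⟩
  | cons p l ih =>
    intro seen h
    obtain ⟨he, hi⟩ := pv_step3_eq tokens seen p h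
    rw [List.foldl_cons, List.foldl_cons, he]
    exact ih _ hi

theorem pvB_pass4_ext (pos : List String) :
    ∀ (fuel : Nat) (pend seen : List Int), ∃ suf, pvB_pass4 pos fuel pend seen = seen ++ suf := by
  intro fuel
  induction fuel with
  | zero => intro pend seen; exact ⟨[], by simp [pvB_pass4]⟩
  | succ fuel ih =>
    intro pend seen
    cases pend with
    | nil => exact ⟨[], by simp [pvB_pass4]⟩
    | cons q rest =>
      simp only [pvB_pass4]
      by_cases hc : (0 ≤ q - 1 && !(seen.contains (q - 1)) && PySem.List.pyGetD pos (q - 1) "" == "AD") = true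
      · obtain ⟨suf, hsuf⟩ := ih (rest ++ [q - 1]) (seen ++ [q - 1])
        refine ⟨[q - 1] ++ suf, ?_⟩
        rw [if_pos hc, hsuf, List.append_assoc]
      · obtain ⟨suf, hsuf⟩ := ih rest seen
        exact ⟨suf, by rw [if_neg hc, hsuf]⟩

theorem pv_pass4 (tokens pos : List String) :
    ∀ (fuel : Nat) (pend seen : List Int), pvInv tokens seen → (∀ x ∈ pend, x ∈ seen) →
      pvA_pass4 tokens pos fuel (pend.map (pvg tokens)) seen
          = ((pend ++ (pvB_pass4 pos fuel pend seen).drop seen.length).map (pvg tokens),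
             pvB_pass4 pos fuel pend seen)
        ∧ pvInv tokens (pvB_pass4 pos fuel pend seen) := by
  intro fuel
  induction fuel with
  | zero =>
    intro pend seen hinv _
    refine ⟨?_, by simpa [pvB_pass4] using hinv⟩
    simp [pvA_pass4, pvB_pass4, List.drop_length]
  | succ fuel ih =>
    intro pend seen hinv hsub
    cases pend with
    | nil =>
      refine ⟨?_, by simpa [pvB_pass4] using hinv⟩
      simp [pvA_pass4, pvB_pass4, List.drop_length]
    | cons q rest =>
      have hqb : 0 ≤ q ∧ q < (tokens.length : Int) := hinv.1 q (hsub q (by simp))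
      have hrest : ∀ x ∈ rest, x ∈ seen := fun x hx => hsub x (by simp [hx])
      simp only [List.map_cons, pvA_pass4, pvB_pass4, pvg]
      by_cases hq : q > 0
      · by_cases hm : (q - 1) ∈ seen
        · have hA2 : ¬ (!(PySem.Set.contains seen (q - 1)) && decide (q - 1 < (tokens.length : Int))) = true := by
            simp [PySem.Set.contains, hm]
          have hB : ¬ (0 ≤ q - 1 && !(seen.contains (q - 1)) && PySem.List.pyGetD pos (q - 1) "" == "AD") = true := by
            simp [hm]
          rw [if_pos hq, if_neg hA2, if_neg hB, (ih rest seen hinv hrest).1]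
          exact ⟨by simp [pvg], (ih rest seen hinv hrest).2⟩
        · by_cases hAD : (PySem.List.pyGetD pos (q - 1) "" == "AD") = true
          · have h0q : (0 : Int) ≤ q - 1 := by omega
            have hlt : q - 1 < (tokens.length : Int) := by omega
            have hA2 : (!(PySem.Set.contains seen (q - 1)) && decide (q - 1 < (tokens.length : Int))) = true := by
              simp [PySem.Set.contains, hm, hlt]
            have hB : (0 ≤ q - 1 && !(seen.contains (q - 1)) && PySem.List.pyGetD pos (q - 1) "" == "AD") = true := by
              simp [hm, hAD]; omega
            have hmap : (rest.map (pvg tokens)) ++ [(q - 1, PySem.List.pyGetD tokens (q - 1) "")]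
                = (rest ++ [q - 1]).map (pvg tokens) := by simp [pvg]
            have hinv' : pvInv tokens (seen ++ [q - 1]) := by
              refine ⟨?_, pv_nodup_snoc _ _ hinv.2 hm⟩
              intro x hx
              rcases List.mem_append.1 hx with hx | hx
              · exact hinv.1 x hx
              · rw [List.mem_singleton] at hx; rw [hx]; exact ⟨h0q, hlt⟩
            have hsub' : ∀ x ∈ rest ++ [q - 1], x ∈ seen ++ [q - 1] := by
              intro x hx
              rcases List.mem_append.1 hx with hx | hx
              · exact List.mem_append.2 (Or.inl (hrest x hx))
              · exact List.mem_append.2 (Or.inr hx)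
            rw [if_pos hq, if_pos hA2, if_pos hAD, if_pos hB, pv_add_of_not_mem _ _ hm, hmap,
                (ih (rest ++ [q - 1]) (seen ++ [q - 1]) hinv' hsub').1]
            obtain ⟨suf, hsuf⟩ := pvB_pass4_ext pos fuel (rest ++ [q - 1]) (seen ++ [q - 1])
            have d1 : ((seen ++ [q - 1]) ++ suf).drop ((seen ++ [q - 1]).length) = suf :=
              List.drop_left
            have d2 : ((seen ++ [q - 1]) ++ suf).drop seen.length = [q - 1] ++ suf := by
              rw [List.append_assoc]; exact List.drop_left
            constructor
            · rw [hsuf, d1, d2]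
              simp [pvg]
            · exact (ih (rest ++ [q - 1]) (seen ++ [q - 1]) hinv' hsub').2
          · have hB : ¬ (0 ≤ q - 1 && !(seen.contains (q - 1)) && PySem.List.pyGetD pos (q - 1) "" == "AD") = true := by
              simp only [Bool.and_eq_true]
              rintro ⟨-, h⟩
              exact hAD h
            rw [if_pos hq, if_neg hB, (ih rest seen hinv hrest).1]
            refine ⟨?_, (ih rest seen hinv hrest).2⟩
            by_cases hA2 : (!(PySem.Set.contains seen (q - 1)) && decide (q - 1 < (tokens.length : Int))) = true
            · rw [if_pos hA2, if_neg hAD]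
              simp [pvg]
            · rw [if_neg hA2]
              simp [pvg]
      · have hB : ¬ (0 ≤ q - 1 && !(seen.contains (q - 1)) && PySem.List.pyGetD pos (q - 1) "" == "AD") = true := by
          simp only [Bool.and_eq_true]
          rintro ⟨⟨h01, -⟩, -⟩
          rw [decide_eq_true_eq] at h01
          omega
        rw [if_neg hq, if_neg hB, (ih rest seen hinv hrest).1]
        exact ⟨by simp [pvg], (ih rest seen hinv hrest).2⟩

theorem pv_insertBy_congr (b1 b2 : (Int × String) → (Int × String) → Bool) (x : Int × String) :
    ∀ (ys : List (Int × String)), (∀ y ∈ ys, b1 x y = b2 x y) →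
      PySem.List.insertBy b1 x ys = PySem.List.insertBy b2 x ys := by
  intro ys
  induction ys with
  | nil => intro _; rfl
  | cons y ys ih =>
    intro h
    simp only [PySem.List.insertBy]
    rw [h y (by simp)]
    by_cases hb : b2 x y = true
    · rw [if_pos hb, if_pos hb]
    · rw [if_neg hb, if_neg hb, ih (fun z hz => h z (by simp [hz]))]

theorem pv_foldl_insertBy_congr (b1 b2 : (Int × String) → (Int × String) → Bool)
    (l0 : List (Int × String)) (hb : ∀ a b, a ∈ l0 → b ∈ l0 → b1 a b = b2 a b) :
    ∀ (l acc : List (Int × String)), (∀ x ∈ l, x ∈ l0) → (∀ x ∈ acc, x ∈ l0) →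
      l.foldl (fun acc x => PySem.List.insertBy b1 x acc) acc
        = l.foldl (fun acc x => PySem.List.insertBy b2 x acc) acc := by
  intro l
  induction l with
  | nil => intro acc _ _; rfl
  | cons x l ih =>
    intro acc hl hacc
    rw [List.foldl_cons, List.foldl_cons,
        pv_insertBy_congr b1 b2 x acc (fun y hy => hb x y (hl x (by simp)) (hacc y hy))]
    refine ih _ (fun z hz => hl z (by simp [hz])) ?_
    intro z hz
    rcases (PySem.List.mem_insertBy b2 x z acc).1 hz with h | h
    · exact h ▸ hl x (by simp)
    · exact hacc z h

theorem pv_sorted2_fst (xs : List (Int × String))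
    (hsnd : ∀ a b, a ∈ xs → b ∈ xs → a.1 = b.1 → a.2 = b.2) :
    PySem.List.sorted2 xs Prod.fst Prod.snd = PySem.List.sorted xs Prod.fst := by
  rw [PySem.List.sorted_eq_foldl_insertBy]
  show xs.foldl (fun acc x => PySem.List.insertBy
      (fun a b => decide (a.1 < b.1) || (!decide (b.1 < a.1) && decide (a.2 < b.2))) x acc) [] = _
  refine pv_foldl_insertBy_congr _ _ xs ?_ xs [] (fun x h => h) (by simp)
  intro a b ha hb
  rcases lt_trichotomy a.1 b.1 with h | h | h
  · simp [h, not_lt.mpr h.le]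
  · have h2 := hsnd a b ha hb h
    simp [h, h2]
  · simp [not_lt.mpr h.le, h]

theorem pv_sorted_map (tokens : List String) (S : List Int) (h : S.Nodup) :
    PySem.List.sorted (S.map (pvg tokens)) Prod.fst
      = (PySem.List.sorted S (fun x => x)).map (pvg tokens) := by
  apply PySem.List.sorted_eq_of_perm_of_pairwise_lt
  · exact (PySem.List.sorted_perm S (fun x => x) false).map _
  · rw [List.pairwise_map]
    have h1 := PySem.List.sorted_pairwise S (fun x => x)
    have h2 : (PySem.List.sorted S (fun x => x) false).Nodup :=
      ((PySem.List.sorted_perm S (fun x => x) false).nodup_iff).2 h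
    exact (h1.and h2).imp (fun hab => by
      simp only [pvg]
      exact lt_of_le_of_ne hab.1 hab.2)

theorem pv_clean_eq (start_idx : Int) (tokens : List String)
    (deps : List (Int × String)) (pos : List String) :
    pvCleanA start_idx tokens deps pos = pvCleanB start_idx tokens deps pos := by
  unfold pvCleanA pvCleanB
  by_cases h0 : (start_idx < 0 || start_idx ≥ (tokens.length : Int)) = true
  · rw [if_pos h0, if_pos h0]
  · rw [if_neg h0, if_neg h0]
    have hs : 0 ≤ start_idx ∧ start_idx < (tokens.length : Int) := by
      simp only [Bool.or_eq_true, decide_eq_true_eq, not_or] at h0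
      exact ⟨by omega, by omega⟩
    have hr1 : pvA_collect tokens deps 4 start_idx (PySem.Set.ofList [start_idx]) = ([], [start_idx]) :=
      pvA_collect_dead _ _ _ _ _ (by simp [PySem.Set.ofList, PySem.Set.add, PySem.Set.empty])
    have hinv0 : pvInv tokens [start_idx] := by
      refine ⟨?_, List.nodup_singleton _⟩
      intro x hx; rw [List.mem_singleton] at hx; rw [hx]; exact hs
    have hinit : ([(start_idx, PySem.List.pyGetD tokens start_idx "")]
        ++ (pvA_collect tokens deps 4 start_idx (PySem.Set.ofList [start_idx])).1,
        (pvA_collect tokens deps 4 start_idx (PySem.Set.ofList [start_idx])).2)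
        = (([start_idx]).map (pvg tokens), [start_idx]) := by
      rw [hr1]; simp [pvg]
    obtain ⟨h2eq, h2inv⟩ := pv_pass2 tokens deps start_idx (PySem.List.enumerate deps) [start_idx] hinv0
    set L1 := (PySem.List.enumerate deps).foldl (pvStepB2 tokens start_idx) [start_idx] with hL1
    obtain ⟨h3eq, h3inv⟩ := pv_pass3 tokens (PySem.List.enumerate tokens) L1 h2inv
    set L2 := (PySem.List.enumerate tokens).foldl (pvStepB3 tokens) L1 with hL2
    obtain ⟨h4eq, h4inv⟩ := pv_pass4 tokens pos (L2.length + tokens.length) L2 L2 h3inv (fun x hx => hx)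
    set L3 := pvB_pass4 pos (L2.length + tokens.length) L2 L2 with hL3
    rw [hinit, h2eq, h3eq]
    dsimp only
    rw [List.length_map, h4eq]
    dsimp only
    have hfull : L2 ++ L3.drop L2.length = L3 := by
      obtain ⟨suf, hsuf⟩ := pvB_pass4_ext pos (L2.length + tokens.length) L2 L2
      rw [← hL3] at hsuf
      rw [hsuf, List.drop_left]
    rw [hfull]
    rw [PySem.List.foldl_append_if_eq_filter, List.nil_append,
        List.filter_eq_self.mpr (by
          intro a ha
          rcases List.mem_map.1 ha with ⟨x, hx, hpa⟩
          have hbd := h4inv.1 x hx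
          rw [← hpa]
          simp [pvg, hbd.1, hbd.2])]
    rw [pv_sorted2_fst (L3.map (pvg tokens)) (by
          intro a b ha hb hfst
          rcases List.mem_map.1 ha with ⟨x, _, hpa⟩
          rcases List.mem_map.1 hb with ⟨y, _, hpb⟩
          rw [← hpa, ← hpb] at hfst ⊢
          simp only [pvg] at hfst ⊢
          rw [hfst]),
        pv_sorted_map tokens L3 h4inv.2, List.map_map]
    have hcomp : (Prod.snd ∘ pvg tokens) = (fun i : Int => PySem.List.pyGetD tokens i "") := by
      funext i; simp [pvg]
    rw [hcomp]


-- ===== VERDICT (by name: the statement is the Claim_ definition above) =====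
theorem extract_complete_phrase_spec : Claim_equal_extract_complete_phrase := by
  intro start_idx tokens dependencies pos_tags _ _
  unfold Spec_extract_complete_phrase
  have hA : extract_complete_phrase start_idx tokens dependencies pos_tags
      = pvCleanA start_idx tokens dependencies pos_tags := rfl
  have hB : extract_complete_phrase_alt start_idx tokens dependencies pos_tags
      = pvCleanB start_idx tokens dependencies pos_tags := rfl
  rw [hA, hB, pv_clean_eq]
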